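-- pv_equiv track=rewrite | github.com/maxim25munin/NLP-Group-7-Topic-1 | scripts/download_urdu_offensive_dataset.py | select_file
-- ===== SOURCE A (Python) =====
-- from typing import Dict, Iterable, List, Optional, Tuple
--
-- def select_file(metadata: Dict, artifact_name: Optional[str]) -> Dict:
--     files = metadata.get("files") or []
--     if not files:
--         raise SystemExit("No files listed in Zenodo metadata; cannot proceed.")
--
--     if artifact_name:
--         for f in files:
--             if f.get("key") == artifact_name:
--                 return f
--         raise SystemExit(f"Requested artifact '{artifact_name}' not found in record.")
--
--     preferred_exts = (".csv", ".tsv", ".txt")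
--     for ext in preferred_exts:
--         for f in files:
--             key = f.get("key", "")
--             if key.lower().endswith(ext):
--                 return f
--
--     return files[0]
-- ===== SOURCE B (Python) =====
-- def select_file(metadata, artifact_name):
--     files = metadata.get("files") or []
--     if not files:
--         raise SystemExit("No files listed in Zenodo metadata; cannot proceed.")
--
--     if artifact_name:
--         match = next((f for f in files if f.get("key") == artifact_name), None)
--         if match is None:
--             raise SystemExit(f"Requested artifact '{artifact_name}' not found in record.")
--         return match
--
--     preferred_exts = (".csv", ".tsv", ".txt")
--     index = {}
--     for f in files:
--         low = f.get("key", "").lower()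
--         for ext in preferred_exts:
--             if ext not in index and low.endswith(ext):
--                 index[ext] = f
--     for ext in preferred_exts:
--         if ext in index:
--             return index[ext]
--     return files[0]
-- ===== Notes on version B (the rewrite author's own statement) =====
-- stated objective: alternative
-- what changed: The default case's extension-major nested scan over the file list is replaced by one file-major pass building a first-match index from preferred extension to file, followed by a priority-order lookup in that index; the artifact lookup becomes a next() over a generator.
import Mathlib
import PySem

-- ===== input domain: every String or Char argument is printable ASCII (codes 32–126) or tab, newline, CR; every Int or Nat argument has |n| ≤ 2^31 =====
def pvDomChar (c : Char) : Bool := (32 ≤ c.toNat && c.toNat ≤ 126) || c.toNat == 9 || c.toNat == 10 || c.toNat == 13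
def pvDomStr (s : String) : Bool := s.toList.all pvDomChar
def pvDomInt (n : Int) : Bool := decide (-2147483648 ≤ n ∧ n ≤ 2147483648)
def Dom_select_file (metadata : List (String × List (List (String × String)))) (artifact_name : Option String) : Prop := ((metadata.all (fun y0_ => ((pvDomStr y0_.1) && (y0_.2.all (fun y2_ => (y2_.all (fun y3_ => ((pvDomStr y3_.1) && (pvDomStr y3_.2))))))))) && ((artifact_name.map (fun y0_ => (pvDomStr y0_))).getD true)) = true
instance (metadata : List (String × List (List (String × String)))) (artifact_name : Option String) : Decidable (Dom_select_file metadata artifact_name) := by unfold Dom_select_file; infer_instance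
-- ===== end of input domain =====

-- B replaces A's extension-major nested scan (default case) by a single file-major pass
-- building a first-match index per preferred extension plus a priority-order lookup
-- (objective: alternative decomposition, same cost).


-- ===== PORT A =====
-- for f in files: if f.get("key") == artifact_name: return f   (empty list = SystemExit, excluded by Pre_; port returns [])
def pvFindArtifact (files : List (List (String × String))) (s : String) : List (String × String) :=
  match files with
  | [] => []
  | f :: rest => if (PySem.Dict.mk f).get? "key" == some s then f else pvFindArtifact rest s

-- inner loop: for f in files: if f.get("key","").lower().endswith(ext): return f
def pvScanExt (files : List (List (String × String))) (ext : String) : Option (List (String × String)) :=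
  match files with
  | [] => none
  | f :: rest =>
    if PySem.Str.endswith (PySem.Str.lower ((PySem.Dict.mk f).getD "key" "")) ext then some f
    else pvScanExt rest ext

-- outer loop: for ext in preferred_exts: …  falling through to 'return files[0]'
def pvScanExts (files : List (List (String × String))) (exts : List String) : List (String × String) :=
  match exts with
  | [] => files.headD []
  | e :: rest =>
    match pvScanExt files e with
    | some f => f
    | none => pvScanExts files rest

def select_file (metadata : List (String × List (List (String × String)))) (artifact_name : Option String) : List (String × String) :=
  let files := ((PySem.Dict.mk metadata).get? "files").getD []
  if files = [] then []      -- SystemExit, excluded by Pre_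
  else
    match artifact_name with
    | some s =>
      if s ≠ "" then pvFindArtifact files s
      else pvScanExts files [".csv", ".tsv", ".txt"]
    | none => pvScanExts files [".csv", ".tsv", ".txt"]

-- ===== PORT B =====
-- body of the file-major pass: record f under each preferred extension its key ends with, first match only
def pvIndexFile (idx : PySem.Dict String (List (String × String))) (f : List (String × String)) : PySem.Dict String (List (String × String)) :=
  let low := PySem.Str.lower ((PySem.Dict.mk f).getD "key" "")
  [".csv", ".tsv", ".txt"].foldl
    (fun idx ext =>
      if !(idx.contains ext) && PySem.Str.endswith low ext then idx.insert ext f else idx)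
    idx

-- one pass over files: index[ext] = first file whose key.lower() ends with ext
def pvBuildIndex (files : List (List (String × String))) : PySem.Dict String (List (String × String)) :=
  files.foldl pvIndexFile (PySem.Dict.mk [])

-- for ext in preferred_exts: if ext in index: return index[ext]   then 'return files[0]'
def pvLookup (files : List (List (String × String))) (idx : PySem.Dict String (List (String × String))) (exts : List String) : List (String × String) :=
  match exts with
  | [] => files.headD []
  | e :: rest =>
    match idx.get? e with
    | some f => f
    | none => pvLookup files idx rest

def select_file_alt (metadata : List (String × List (List (String × String)))) (artifact_name : Option String) : List (String × String) :=
  let files := ((PySem.Dict.mk metadata).get? "files").getD []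
  if files = [] then []      -- SystemExit, excluded by Pre_
  else
    match artifact_name with
    | some s =>
      if s ≠ "" then ((files.find? (fun f => (PySem.Dict.mk f).get? "key" == some s)).getD [])
      else pvLookup files (pvBuildIndex files) [".csv", ".tsv", ".txt"]
    | none => pvLookup files (pvBuildIndex files) [".csv", ".tsv", ".txt"]

-- ===== PRECONDITION & SPEC =====
-- Pre_ excludes exactly the inputs where A raises SystemExit: an empty/absent "files" list,
-- and a truthy artifact_name that matches no file's "key".
def Pre_select_file (metadata : List (String × List (List (String × String)))) (artifact_name : Option String) : Prop :=
  (let files := ((PySem.Dict.mk metadata).get? "files").getD []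
   (!files.isEmpty) &&
     (match artifact_name with
      | none => true
      | some s => (s == "") || files.any (fun f => (PySem.Dict.mk f).get? "key" == some s))) = true
instance (metadata : List (String × List (List (String × String)))) (artifact_name : Option String) : Decidable (Pre_select_file metadata artifact_name) := by unfold Pre_select_file; infer_instance

def pvWitness_select_file : (List (String × List (List (String × String)))) × Option String :=
  ([("files", [[("key", "data.csv")]])], some "data.csv")

def Spec_select_file (metadata : List (String × List (List (String × String)))) (artifact_name : Option String) (out : List (String × String)) : Prop := out = select_file_alt metadata artifact_name
instance (metadata : List (String × List (List (String × String)))) (artifact_name : Option String) (out : List (String × String)) : Decidable (Spec_select_file metadata artifact_name out) := by unfold Spec_select_file; infer_instance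

-- ===== CLAIM (what is proved, stated in full; the proofs are below) =====
def Claim_equal_select_file : Prop := ∀ (metadata : List (String × List (List (String × String)))) (artifact_name : Option String), Dom_select_file metadata artifact_name → Pre_select_file metadata artifact_name → Spec_select_file metadata artifact_name (select_file metadata artifact_name)

-- ===== LEMMAS AND PROOFS =====

-- A's artifact scan is B's find?-with-default (they agree even when nothing matches).
theorem findArtifact_eq (files : List (List (String × String))) (s : String) :
    pvFindArtifact files s = (files.find? (fun f => (PySem.Dict.mk f).get? "key" == some s)).getD [] := by
  induction files with
  | nil => rfl
  | cons f rest ih =>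
    simp only [pvFindArtifact, List.find?]
    by_cases h : ((PySem.Dict.mk f).get? "key" == some s) = true
    · simp [h]
    · simp [h, ih]

-- one inner fold step of pvBuildIndex, observed at a preferred extension
theorem step_get (idx : PySem.Dict String (List (String × String))) (f : List (String × String))
    (ext : String) (hext : ext ∈ [".csv", ".tsv", ".txt"]) :
    (pvIndexFile idx f).get? ext
    = if PySem.Str.endswith (PySem.Str.lower ((PySem.Dict.mk f).getD "key" "")) ext
        then some ((idx.get? ext).getD f)
        else idx.get? ext := by
  unfold pvIndexFile
  set low := PySem.Str.lower ((PySem.Dict.mk f).getD "key" "") with hlow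
  simp only [List.foldl]
  fin_cases hext <;>
  · rcases h1 : idx.get? ".csv" with _ | v1 <;>
    rcases h2 : idx.get? ".tsv" with _ | v2 <;>
    rcases h3 : idx.get? ".txt" with _ | v3 <;>
    by_cases e1 : PySem.Str.endswith low ".csv" = true <;>
    by_cases e2 : PySem.Str.endswith low ".tsv" = true <;>
    by_cases e3 : PySem.Str.endswith low ".txt" = true <;>
    simp_all [PySem.Dict.get?_insert_self, PySem.Dict.get?_insert_of_ne, PySem.Dict.contains_eq_isSome_get?]

-- the index maps each preferred extension to A's scan result (first matching file)
theorem buildIndex_get (files : List (List (String × String)))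
    (ext : String) (hext : ext ∈ [".csv", ".tsv", ".txt"]) (idx : PySem.Dict String (List (String × String))) :
    (files.foldl pvIndexFile idx).get? ext = (idx.get? ext).or (pvScanExt files ext) := by
  induction files generalizing idx with
  | nil => simp [pvScanExt]
  | cons f rest ih =>
    rw [List.foldl_cons, ih, step_get idx f ext hext]
    rcases hid : idx.get? ext with _ | v
    · simp only [pvScanExt]; split <;> simp
    · simp [pvScanExt]

theorem scan_eq_lookup (files : List (List (String × String))) :
    pvScanExts files [".csv", ".tsv", ".txt"] = pvLookup files (pvBuildIndex files) [".csv", ".tsv", ".txt"] := by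
  have h : ∀ ext ∈ [".csv", ".tsv", ".txt"], (pvBuildIndex files).get? ext = pvScanExt files ext := by
    intro ext hext
    have := buildIndex_get files ext hext (PySem.Dict.mk [])
    simpa [pvBuildIndex] using this
  simp only [pvScanExts, pvLookup]
  rw [h ".csv" (by simp), h ".tsv" (by simp), h ".txt" (by simp)]

-- ===== VERDICT (by name: the statement is the Claim_ definition above) =====
theorem select_file_spec : Claim_equal_select_file := by
  intro metadata artifact_name _ _
  unfold Spec_select_file select_file select_file_alt
  rcases artifact_name with _ | s
  · simp [scan_eq_lookup]
  · by_cases hs : s = "" <;> simp [hs, scan_eq_lookup, findArtifact_eq]
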